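/- GENERATED by tools/from_farm_form.py from prooffarm-gif/accepted/DGifSetupDecompress.3/Proof.lean (a worked proof of the farm's unit `DGifSetupDecompress.3`,
   accepted by the verdict) — do not edit. -/
import Gif.Spec.Units.DGifSetupDecompress_3
import Gif.Spec.AllSegs
import Gif.Spec.Proved.DGifSetupDecompress_3_Lemmas

open X86 X86.User Asan ProgX.Base ProgX.Base.Spec Gif.Spec

namespace Gif.Spec.DGifSetupDecompress_3

/-- **The counter as a number**: `rbx = i` with `i ≤ 4097` reads back as `i` (for the loop's measure `4096 − rbx`). -/
theorem sd3_counter (x : Word) (i : Nat) (hx : x = UInt64.ofNat i) (hi : i ≤ 4097) : x.toNat = i := by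
  rw [hx, UInt64.toNat_ofNat']
  exact Nat.mod_eq_of_lt (by omega)

end Gif.Spec.DGifSetupDecompress_3

/-- Segment 3 of `DGifSetupDecompress` (10632DH … 10633AH, l.847-851): the loop `for (i = 0; i <= LZ_MAX_CODE; i++) Prefix[i] =
NO_SUCH_CODE`. LOOP INVARIANT at the head 10632DH: `sd3_Inv i` (`AtLoop` with `ebx = i ≤ 4096`); MEASURE `4096 − rbx`; one round is
`sd3_round` (Lemmas.lean): out to `Done` with `eax = 1`, or the checked store `Prefix[i]`, `i < 4096`, and the head again with `i + 1`. -/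
theorem Gif.Spec.Proved.DGifSetupDecompress_3_ok : Gif.Spec.DGifSetupDecompress_3.Statement := by
  unfold Gif.Spec.DGifSetupDecompress_3.Statement
  intro Lay hLay μ hμ u₀ hcode h_store4
  unfold Gif.Spec.DGifSetupDecompress.Seg3
  intro H rest frames F R e ret v hat
  -- 0x10632d, entered: the invariant holds with `i = 0`
  have hinv0 : ∃ i, Gif.Spec.DGifSetupDecompress_3.sd3_Inv i H rest frames F R u₀ e ret v :=
    ⟨0, hat.body, hat.r12, hat.rbx, Nat.zero_le _, hat.lz, hat.rem1⟩
  -- the loop: invariant `∃ i, sd3_Inv i`, measure `4096 − rbx`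
  refine ReachVia.loop (Inv := fun w => ∃ i, Gif.Spec.DGifSetupDecompress_3.sd3_Inv i H rest frames F R u₀ e ret w)
    (fun w => 4096 - (w.reg .rbx).toNat) ?_ v hinv0
  intro w hw
  obtain ⟨i, hw⟩ := hw
  -- one round from the head
  refine (Gif.Spec.DGifSetupDecompress_3.sd3_round Lay hLay μ hμ u₀ hcode h_store4 H rest frames F R e ret i w hw).mono ?_
  intro w' hw'
  rcases hw' with hdone | ⟨hnext, hlt⟩
  · -- out: `Done`
    exact Or.inl hdone
  · -- the head again: `i + 1`, the measure went down
    refine Or.inr ⟨⟨i + 1, hnext⟩, ?_⟩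
    have e1 := Gif.Spec.DGifSetupDecompress_3.sd3_counter _ _ hw.rbx (by omega)
    have e2 := Gif.Spec.DGifSetupDecompress_3.sd3_counter _ _ hnext.rbx (by omega)
    show 4096 - (w'.reg .rbx).toNat < 4096 - (w.reg .rbx).toNat
    rw [e1, e2]
    omega
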